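-- pv_equiv track=rewrite | github.com/Maize-Genetics-and-Genomics-Database/qTeller | web_interface/image_handling/B73vsB104_chart_B73v4_B104v4.py | group_by_source
-- ===== SOURCE A (Python) =====
-- def group_by_source(exps):
--     sources = {}
--     for e in exps:
--         if not exps[e]['source'] in sources: sources[exps[e]['source']] = []
--         sources[exps[e]['source']].append(exps[e])
--     for x in sources:
--         sources[x].sort(key=lambda val: val['name'])
--     return sources
-- ===== SOURCE B (Python) =====
-- def group_by_source(exps):
--     values = list(exps.values())
--     # groups keyed by source, in first-appearance order of the source
--     sources = {v['source']: [] for v in values}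
--     # one globally name-sorted pass; sort stability makes each group name-sorted
--     for v in sorted(values, key=lambda v: v['name']):
--         sources[v['source']].append(v)
--     return sources
-- ===== Notes on version B (the rewrite author's own statement) =====
-- stated objective: alternative
-- what changed: Instead of grouping first and then sorting every group separately, B sorts all experiment records once globally by name and then distributes them into their source groups in a single stable pass (groups pre-created in first-appearance order so the dict key order matches A's).
import Mathlib
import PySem

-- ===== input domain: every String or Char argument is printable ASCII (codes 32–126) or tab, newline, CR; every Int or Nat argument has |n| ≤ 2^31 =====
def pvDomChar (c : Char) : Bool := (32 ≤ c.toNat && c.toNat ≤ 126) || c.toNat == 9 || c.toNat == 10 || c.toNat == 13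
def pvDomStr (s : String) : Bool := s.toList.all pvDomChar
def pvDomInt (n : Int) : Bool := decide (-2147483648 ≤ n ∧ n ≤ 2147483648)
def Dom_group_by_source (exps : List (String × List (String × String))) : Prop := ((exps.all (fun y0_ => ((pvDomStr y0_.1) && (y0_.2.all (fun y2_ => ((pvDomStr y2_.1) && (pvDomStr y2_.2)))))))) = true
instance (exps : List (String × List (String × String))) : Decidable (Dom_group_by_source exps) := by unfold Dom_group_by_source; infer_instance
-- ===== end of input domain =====

-- B sorts all records once globally by name and distributes them into source groups in one
-- stable pass, instead of A's group-then-sort-each-group; alternative decomposition, same cost.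


-- shared accessors: v['source'] / v['name'] on an inner dict (total under Pre_, which
-- guarantees the keys are present; Python raises KeyError otherwise)
def pvSrc (v : List (String × String)) : String := (PySem.Dict.mk v).getD "source" ""
def pvName (v : List (String × String)) : String := (PySem.Dict.mk v).getD "name" ""

-- ===== PORT A =====
-- sources = {}; for e in exps: group exps[e] under exps[e]['source']; then sort each group by name
def group_by_source (exps : List (String × List (String × String))) : List (String × List (List (String × String))) :=
  let d : PySem.Dict String (List (String × String)) := PySem.Dict.mk exps
  let sources : PySem.Dict String (List (List (String × String))) :=
    (exps.map Prod.fst).foldl (fun sources e =>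
      let v := d.getD e []                     -- exps[e] (e is a key of exps, so no KeyError)
      let src := pvSrc v
      let sources := if sources.contains src then sources else sources.insert src []
      sources.modify src [] (fun g => g ++ [v])    -- sources[src].append(exps[e])
    ) PySem.Dict.empty
  let sources :=
    sources.keys.foldl (fun sources x =>
      sources.modify x [] (fun g => PySem.List.sorted g pvName false)   -- sources[x].sort(key=name)
    ) sources
  sources.items

-- ===== PORT B =====
def group_by_source_alt (exps : List (String × List (String × String))) : List (String × List (List (String × String))) :=
  let values := exps.map Prod.snd                               -- list(exps.values())
  let sources : PySem.Dict String (List (List (String × String))) :=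
    values.foldl (fun s v => s.insert (pvSrc v) []) PySem.Dict.empty   -- {v['source']: [] for v in values}
  let sources :=
    (PySem.List.sorted values pvName false).foldl (fun s v =>
      s.modify (pvSrc v) [] (fun g => g ++ [v])                 -- sources[v['source']].append(v)
    ) sources
  sources.items

-- ===== PRECONDITION & SPEC =====
-- Pre_ requires (a) distinct top-level keys — the argument models a Python dict, whose keys
-- are unique by construction — and (b) every value dict to contain the keys 'source' and
-- 'name', without which Python A raises KeyError.
def Pre_group_by_source (exps : List (String × List (String × String))) : Prop :=
  (exps.map Prod.fst).Nodup ∧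
  ∀ p ∈ exps, ((p.2.map Prod.fst).contains "source" ∧ (p.2.map Prod.fst).contains "name")
instance (exps : List (String × List (String × String))) : Decidable (Pre_group_by_source exps) := by unfold Pre_group_by_source; infer_instance
def pvWitness_group_by_source : (List (String × List (String × String))) :=
  [("e1", [("source", "leaf"), ("name", "b")]), ("e2", [("source", "root"), ("name", "a")]),
   ("e3", [("source", "leaf"), ("name", "a")])]
def Spec_group_by_source (exps : List (String × List (String × String))) (out : List (String × List (List (String × String)))) : Prop := out = group_by_source_alt exps
instance (exps : List (String × List (String × String))) (out : List (String × List (List (String × String)))) : Decidable (Spec_group_by_source exps out) := by unfold Spec_group_by_source; infer_instance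

-- ===== CLAIM (what is proved, stated in full; the proofs are below) =====
def Claim_equal_group_by_source : Prop := ∀ (exps : List (String × List (String × String))), Dom_group_by_source exps → Pre_group_by_source exps → Spec_group_by_source exps (group_by_source exps)

-- ===== LEMMAS AND PROOFS =====

theorem pv_insertBy_front {α κ : Type} [LinearOrder κ] (key : α → κ) (x : α) (l : List α)
    (h : ∀ z ∈ l, key x < key z) :
    PySem.List.insertBy (fun a b => decide (key a < key b)) x l = x :: l := by
  cases l with
  | nil => rfl
  | cons y t => simp [PySem.List.insertBy, h y (by simp)]

theorem pv_filter_insertBy {α κ : Type} [LinearOrder κ] (key : α → κ) (p : α → Bool) (x : α)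
    (ys : List α) (h : ys.Pairwise (fun a b => key a ≤ key b)) :
    (PySem.List.insertBy (fun a b => decide (key a < key b)) x ys).filter p =
      if p x then PySem.List.insertBy (fun a b => decide (key a < key b)) x (ys.filter p)
      else ys.filter p := by
  induction ys with
  | nil => simp [PySem.List.insertBy]; split <;> simp_all [List.filter]
  | cons y t ih =>
    rcases List.pairwise_cons.mp h with ⟨hy, ht⟩
    by_cases hb : key x < key y
    · simp only [PySem.List.insertBy, hb, decide_true, if_true]
      by_cases hpx : p x = true
      · by_cases hpy : p y = true
        · simp [List.filter, hpx, hpy, PySem.List.insertBy, hb]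
        · simp only [List.filter_cons, hpx, hpy, if_true, if_false, Bool.false_eq_true]
          rw [pv_insertBy_front]
          intro z hz
          rcases List.mem_filter.mp hz with ⟨hz1, _⟩
          exact lt_of_lt_of_le hb (hy z hz1)
      · simp [List.filter_cons, hpx]
    · simp only [PySem.List.insertBy, hb, decide_false, Bool.false_eq_true, if_false]
      by_cases hpx : p x = true
      · by_cases hpy : p y = true
        · simp only [List.filter_cons, hpy, if_true, ih ht, hpx,
            PySem.List.insertBy, hb, decide_false, Bool.false_eq_true, if_false]
        · simp [hpy, ih ht, hpx]
      · simp [List.filter_cons, ih ht, hpx]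

theorem pv_sorted_append_singleton {α κ : Type} [LinearOrder κ] (key : α → κ) (x : α)
    (ys : List α) :
    PySem.List.sorted (ys ++ [x]) key false =
      PySem.List.insertBy (fun a b => decide (key a < key b)) x (PySem.List.sorted ys key false) := by
  rw [PySem.List.sorted_eq_foldl_insertBy, List.foldl_append, ← PySem.List.sorted_eq_foldl_insertBy]
  simp

theorem pv_filter_sorted {α κ : Type} [LinearOrder κ] (key : α → κ) (p : α → Bool) (xs : List α) :
    (PySem.List.sorted xs key false).filter p = PySem.List.sorted (xs.filter p) key false := by
  induction xs using List.reverseRecOn with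
  | nil => rfl
  | append_singleton xs x ih =>
    rw [pv_sorted_append_singleton,
      pv_filter_insertBy key p x _ (PySem.List.sorted_pairwise xs key)]
    by_cases hpx : p x = true
    · rw [if_pos hpx, show (xs ++ [x]).filter p = xs.filter p ++ [x] by simp [List.filter_append, hpx],
        pv_sorted_append_singleton, ih]
    · rw [if_neg (by simp [hpx]),
        show (xs ++ [x]).filter p = xs.filter p by simp [List.filter_append, hpx], ih]

-- A's "if src not in sources: sources[src] = []" followed by append IS a single modify
theorem pv_setdefault_modify {ν : Type} (d : PySem.Dict String ν) (k : String) (e : ν)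
    (f : ν → ν) :
    ((if d.contains k then d else d.insert k e).modify k e f) = d.modify k e f := by
  by_cases h : d.contains k = true
  · simp [h]
  · simp only [h, Bool.false_eq_true, if_false, PySem.Dict.modify,
      PySem.Dict.getD_insert_self, PySem.Dict.insert_insert_self,
      PySem.Dict.getD_of_not_contains d e (eq_false_of_ne_true h)]

-- a dict built by inserting [] at every key reads [] everywhere (w.r.t. default [])
theorem pv_getD_foldl_insert_nil {α ν : Type} (l : List α) (k : α → String)
    (d : PySem.Dict String (List ν)) (c : String) (h : d.getD c [] = []) :
    (l.foldl (fun s v => s.insert (k v) []) d).getD c [] = [] := by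
  induction l generalizing d with
  | nil => simpa using h
  | cons a t ih =>
    simp only [List.foldl_cons]
    exact ih _ (by rw [PySem.Dict.getD_insert]; split <;> simp [h])

-- folding modify over a Nodup key list applies f once at each listed key
theorem pv_getD_foldl_modify {ν : Type} (ks : List String) (hnd : ks.Nodup)
    (f : List ν → List ν) (d : PySem.Dict String (List ν)) (c : String) :
    (ks.foldl (fun s x => s.modify x [] f) d).getD c [] =
      if c ∈ ks then f (d.getD c []) else d.getD c [] := by
  induction ks generalizing d with
  | nil => simp
  | cons a t ih =>
    rcases List.nodup_cons.mp hnd with ⟨ha, ht⟩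
    simp only [List.foldl_cons, ih ht, List.mem_cons]
    by_cases hc : c ∈ t
    · have hca : c ≠ a := fun e => ha (e ▸ hc)
      simp [hc, PySem.Dict.getD_modify, hca]
    · by_cases hca : c = a
      · subst hca
        simp [hc]
      · simp [hc, hca, PySem.Dict.getD_modify]

-- updating a set with elements it already has changes nothing
theorem pv_update_self (s l : List String) (h : ∀ x ∈ l, x ∈ s) :
    PySem.Set.update s l = s := by
  rw [PySem.Set.update_eq_append_filter]
  have hnil : List.filter (fun y => !PySem.Set.contains s y) (PySem.Set.ofList l) = [] := by
    rw [List.filter_eq_nil_iff]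
    intro y hy
    have hm : y ∈ s := h y ((PySem.Set.mem_ofList l y).mp hy)
    simp [hm]
  rw [hnil, List.append_nil]

theorem pv_main (exps : List (String × List (String × String)))
    (hnd : (exps.map Prod.fst).Nodup) :
    group_by_source exps = group_by_source_alt exps := by
  unfold group_by_source group_by_source_alt
  simp only []
  set vals := exps.map Prod.snd with hvals
  -- A's first loop equals a fold of modify over the values
  have hA1 : (exps.map Prod.fst).foldl (fun sources e =>
      let v := (PySem.Dict.mk exps).getD e []
      let src := pvSrc v
      let sources := if sources.contains src then sources else sources.insert src []
      sources.modify src [] (fun g => g ++ [v]))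
      (PySem.Dict.empty : PySem.Dict String (List (List (String × String)))) =
      vals.foldl (fun s v => s.modify (pvSrc v) [] (fun g => g ++ [v])) PySem.Dict.empty := by
    rw [hvals, List.foldl_map, List.foldl_map]
    apply PySem.List.foldl_congr_mem
    intro acc p hp
    have hkeys : (PySem.Dict.mk exps).keys.Nodup := by
      simpa [PySem.Dict.keys] using hnd
    have hv : (PySem.Dict.mk exps).getD p.1 [] = p.2 :=
      PySem.Dict.getD_of_mem_items _ hp hkeys []
    simp only [hv, pv_setdefault_modify]
  rw [hA1]
  set D1 := vals.foldl (fun s v => s.modify (pvSrc v) [] (fun g => g ++ [v])) PySem.Dict.empty with hD1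
  set S0 := vals.foldl (fun s v => s.insert (pvSrc v) ([] : List (List (String × String)))) PySem.Dict.empty with hS0
  set sv := PySem.List.sorted vals pvName false with hsv
  set K := PySem.Set.ofList (vals.map pvSrc) with hKdef
  -- keys of the two intermediate dicts
  have hKD1 : D1.keys = K := by
    rw [hD1, PySem.Dict.keys_foldl_modify_key vals pvSrc [] (fun _ v => fun g => g ++ [v]),
      show PySem.Dict.empty.keys = ([] : List String) from rfl, PySem.Set.update_nil_left]
  have hKS0 : S0.keys = K := by
    rw [hS0, PySem.Dict.keys_foldl_insert_key vals pvSrc (fun _ _ => []),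
      show PySem.Dict.empty.keys = ([] : List String) from rfl, PySem.Set.update_nil_left]
  have hKnd : K.Nodup := PySem.Set.nodup_ofList _
  -- group contents
  have hG1 : ∀ c, D1.getD c [] = vals.filter (fun v => pvSrc v == c) := by
    intro c
    rw [hD1, show vals.foldl (fun s v => s.modify (pvSrc v) [] (fun g => g ++ [v])) PySem.Dict.empty
        = (vals.map (fun v => (pvSrc v, v))).foldl
            (fun s p => s.modify p.1 [] (fun g => g ++ [p.2])) PySem.Dict.empty from
          (List.foldl_map (f := fun v => (pvSrc v, v))
            (g := fun s p => PySem.Dict.modify s p.1 [] (fun g => g ++ [p.2]))).symm,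
      PySem.Dict.getD_foldl_modify_append]
    simp [List.filter_map, Function.comp_def]
  -- final dicts
  have hKA : (D1.keys.foldl (fun s x => s.modify x [] (fun g => PySem.List.sorted g pvName false)) D1).keys = K := by
    rw [PySem.Dict.keys_foldl_modify (D1.keys) [] (fun _ _ => fun g => PySem.List.sorted g pvName false) D1,
      hKD1, pv_update_self _ _ (fun x h => h)]
  have hKB : (sv.foldl (fun s v => s.modify (pvSrc v) [] (fun g => g ++ [v])) S0).keys = K := by
    rw [PySem.Dict.keys_foldl_modify_key sv pvSrc [] (fun _ v => fun g => g ++ [v]) S0, hKS0]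
    apply pv_update_self
    intro x hx
    rcases List.mem_map.mp hx with ⟨v, hv, rfl⟩
    rw [hKdef]
    exact (PySem.Set.mem_ofList _ _).mpr (List.mem_map_of_mem ((PySem.List.mem_sorted vals pvName false v).mp hv))
  have hndA : (D1.keys.foldl (fun s x => s.modify x [] (fun g => PySem.List.sorted g pvName false)) D1).keys.Nodup := by
    rw [hKA]; exact hKnd
  have hndB : (sv.foldl (fun s v => s.modify (pvSrc v) [] (fun g => g ++ [v])) S0).keys.Nodup := by
    rw [hKB]; exact hKnd
  rw [PySem.Dict.items_eq_map_keys _ hndA [], PySem.Dict.items_eq_map_keys _ hndB [], hKA, hKB]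
  apply List.map_congr_left
  intro c hc
  have hcD1 : c ∈ D1.keys := by rw [hKD1]; exact hc
  have hA : (D1.keys.foldl (fun s x => s.modify x [] (fun g => PySem.List.sorted g pvName false)) D1).getD c []
      = PySem.List.sorted (vals.filter (fun v => pvSrc v == c)) pvName false := by
    rw [pv_getD_foldl_modify D1.keys (by rw [hKD1]; exact hKnd) _ D1 c, if_pos hcD1, hG1]
  have hB : (sv.foldl (fun s v => s.modify (pvSrc v) [] (fun g => g ++ [v])) S0).getD c []
      = sv.filter (fun v => pvSrc v == c) := by
    rw [show sv.foldl (fun s v => s.modify (pvSrc v) [] (fun g => g ++ [v])) S0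
        = (sv.map (fun v => (pvSrc v, v))).foldl
            (fun s p => s.modify p.1 [] (fun g => g ++ [p.2])) S0 from
          (List.foldl_map (f := fun v => (pvSrc v, v))
            (g := fun s p => PySem.Dict.modify s p.1 [] (fun g => g ++ [p.2]))).symm,
      PySem.Dict.getD_foldl_modify_append,
      pv_getD_foldl_insert_nil vals pvSrc PySem.Dict.empty c (by simp [PySem.Dict.getD_empty])]
    simp [List.filter_map, Function.comp_def]
  rw [hA, hB, hsv, pv_filter_sorted]

-- ===== VERDICT (by name: the statement is the Claim_ definition above) =====
theorem group_by_source_spec : Claim_equal_group_by_source := by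
  intro exps _ hpre
  unfold Spec_group_by_source
  exact pv_main exps hpre.1
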